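-- pv_equiv track=rewrite | github.com/sevenhe716/LeetCode | Array/q849_maximize_distance_to_closest_person.py | maxDistToClosest1
-- ===== SOURCE A (Python) =====
-- def maxDistToClosest1(seats):
--     N = len(seats)
--     left, right = [N] * N, [N] * N
--
--     for i in range(N):
--         if seats[i] == 1:
--             left[i] = 0
--         elif i > 0:     # 排除i==0的情况
--             left[i] = left[i - 1] + 1
--
--     for i in range(N - 1, -1, -1):
--         if seats[i] == 1:
--             right[i] = 0
--         elif i < N - 1:
--             right[i] = right[i + 1] + 1
--
--     return max(min(left[i], right[i])
--                for i, seat in enumerate(seats) if not seat)     # 当座位为空时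
-- ===== SOURCE B (Python) =====
-- def maxDistToClosest1(seats):
--     N = len(seats)
--     # positions of everyone, plus a phantom person a full row-length beyond each
--     # end: a phantom is farther from every seat than any real person can be, so
--     # it is the nearest person on a side only when that side has no one at all
--     people = [-N] + [i for i, s in enumerate(seats) if s == 1] + [2 * N - 1]
--     k = 0          # people[k] <= current seat < people[k + 1]
--     dists = []
--     for j, s in enumerate(seats):
--         if s == 0:
--             while people[k + 1] <= j:
--                 k += 1
--             dists.append(min(j - people[k], people[k + 1] - j))
--     return max(dists)
-- ===== Notes on version B (the rewrite author's own statement) =====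
-- stated objective: alternative
-- what changed: Replaces A's two length-N distance arrays (forward pass, backward pass, then a min-scan over the empty seats) by one pass that walks a precomputed sorted list of person positions, extended with a phantom person a full row-length beyond each end so both boundary cases are handled uniformly; Pre_ excludes only seat lists with no empty seat, on which both A's and B's final max() over an empty sequence raise ValueError.
import Mathlib
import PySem

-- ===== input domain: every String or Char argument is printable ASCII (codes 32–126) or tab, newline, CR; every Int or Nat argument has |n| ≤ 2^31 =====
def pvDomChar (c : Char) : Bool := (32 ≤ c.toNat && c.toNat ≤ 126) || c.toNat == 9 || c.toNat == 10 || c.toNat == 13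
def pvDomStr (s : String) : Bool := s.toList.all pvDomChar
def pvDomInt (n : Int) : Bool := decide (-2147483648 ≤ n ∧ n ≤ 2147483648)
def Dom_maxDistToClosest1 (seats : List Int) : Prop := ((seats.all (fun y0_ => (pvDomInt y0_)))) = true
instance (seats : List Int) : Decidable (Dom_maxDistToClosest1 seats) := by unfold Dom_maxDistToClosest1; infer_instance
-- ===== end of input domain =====

-- B replaces A's two length-N distance arrays (forward pass, backward pass, min-scan over the
-- empty seats) by a single pass that walks a precomputed sorted list of person positions,
-- extended with a phantom person a full row-length beyond each end.

-- ===== PORT A =====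
def maxDistToClosest1 (seats : List Int) : Int :=
  let N : Int := PySem.List.len seats
  let left0 : List Int := List.replicate seats.length N
  let right0 : List Int := List.replicate seats.length N
  let left := (PySem.List.pyRange 0 N 1).foldl (fun l i =>
    if PySem.List.pyGetD seats i 0 = 1 then PySem.List.pySetD l i 0
    else if 0 < i then PySem.List.pySetD l i (PySem.List.pyGetD l (i - 1) 0 + 1)
    else l) left0
  let right := (PySem.List.pyRange (N - 1) (-1) (-1)).foldl (fun r i =>
    if PySem.List.pyGetD seats i 0 = 1 then PySem.List.pySetD r i 0
    else if i < N - 1 then PySem.List.pySetD r i (PySem.List.pyGetD r (i + 1) 0 + 1)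
    else r) right0
  let cands := ((PySem.List.enumerate seats 0).filter (fun p => p.2 == 0)).map
    (fun p => min (PySem.List.pyGetD left p.1 0) (PySem.List.pyGetD right p.1 0))
  (PySem.List.max? cands (fun x => x)).getD 0

-- ===== PORT B =====
-- B's `while people[k + 1] <= j: k += 1` (the bound check only makes the recursion total;
-- on admitted inputs the final phantom position always stops the loop first)
def pvAdv (people : List Int) (j : Int) (k : Int) : Int :=
  if h : k + 1 < PySem.List.len people ∧ PySem.List.pyGetD people (k + 1) 0 ≤ j then
    pvAdv people j (k + 1)
  else k
termination_by (PySem.List.len people - k).toNat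
decreasing_by simp only [PySem.List.len_eq] at *; omega

def maxDistToClosest1_alt (seats : List Int) : Int :=
  let N : Int := PySem.List.len seats
  let people : List Int :=
    [-N] ++ ((PySem.List.enumerate seats 0).filter (fun p => p.2 == 1)).map (fun p => p.1) ++
      [2 * N - 1]
  let st := (PySem.List.enumerate seats 0).foldl (fun (st : Int × List Int) p =>
    if p.2 == 0 then
      (pvAdv people p.1 st.1,
        st.2 ++ [min (p.1 - PySem.List.pyGetD people (pvAdv people p.1 st.1) 0)
                     (PySem.List.pyGetD people (pvAdv people p.1 st.1 + 1) 0 - p.1)])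
    else st) ((0 : Int), ([] : List Int))
  (PySem.List.max? st.2 (fun x => x)).getD 0

-- ===== PRECONDITION & SPEC =====
-- Pre_ excludes exactly the seat lists with no empty seat: there A's final max() ranges over an
-- empty generator and raises ValueError (B's final max() over an empty list raises too).
def Pre_maxDistToClosest1 (seats : List Int) : Prop := (0 : Int) ∈ seats
instance (seats : List Int) : Decidable (Pre_maxDistToClosest1 seats) := by
  unfold Pre_maxDistToClosest1; infer_instance

def pvWitness_maxDistToClosest1 : List Int := [1, 0, 0, 1, 0]

def Spec_maxDistToClosest1 (seats : List Int) (out : Int) : Prop := out = maxDistToClosest1_alt seats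
instance (seats : List Int) (out : Int) : Decidable (Spec_maxDistToClosest1 seats out) := by
  unfold Spec_maxDistToClosest1; infer_instance

-- ===== CLAIM (what is proved, stated in full; the proofs are below) =====
def Claim_equal_maxDistToClosest1 : Prop := ∀ (seats : List Int), Dom_maxDistToClosest1 seats → Pre_maxDistToClosest1 seats → Spec_maxDistToClosest1 seats (maxDistToClosest1 seats)

-- ===== LEMMAS AND PROOFS =====

-- value of A's `left` array at index j (A's forward recurrence, as a function of the index)
def pvL (seats : List Int) : Nat → Int
  | 0 => if seats[0]?.getD 0 = 1 then 0 else (seats.length : Int)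
  | j+1 => if seats[j+1]?.getD 0 = 1 then 0 else pvL seats j + 1

-- value of A's `right` array at index j (A's backward recurrence)
def pvR (seats : List Int) (j : Nat) : Int :=
  if h : j + 1 < seats.length then
    (if seats[j]?.getD 0 = 1 then 0 else pvR seats (j+1) + 1)
  else (if seats[j]?.getD 0 = 1 then 0 else (seats.length : Int))
termination_by seats.length - j

-- index of the last 1 strictly before j (-1 if none)
def pvPrev (seats : List Int) : Nat → Int
  | 0 => -1
  | j+1 => if seats[j]?.getD 0 = 1 then (j : Int) else pvPrev seats j

-- index of the first 1 at position ≥ j, if any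
def pvNext (seats : List Int) (j : Nat) : Option Nat :=
  if h : j < seats.length then
    (if seats[j]?.getD 0 = 1 then some j else pvNext seats (j+1))
  else none
termination_by seats.length - j

def pvCnt (xs : List Int) : Nat := xs.countP (fun s => s == 1)

theorem pvL_eq (seats : List Int) (j : Nat) :
    pvL seats j = if seats[j]?.getD 0 = 1 then 0
      else if 0 ≤ pvPrev seats j then (j : Int) - pvPrev seats j
      else (seats.length : Int) + j := by
  induction j with
  | zero =>
    rw [show pvPrev seats 0 = -1 from rfl, pvL]
    simp
  | succ j ih =>
    rw [pvL, show pvPrev seats (j+1) = if seats[j]?.getD 0 = 1 then (j:Int) else pvPrev seats j from rfl]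
    by_cases h1 : seats[j+1]?.getD 0 = 1
    · rw [if_pos h1, if_pos h1]
    · rw [if_neg h1, if_neg h1]
      by_cases h2 : seats[j]?.getD 0 = 1
      · rw [ih, if_pos h2, if_pos h2, if_pos (by positivity)]
        push_cast; ring
      · rw [ih, if_neg h2, if_neg h2]
        by_cases h3 : 0 ≤ pvPrev seats j
        · rw [if_pos h3, if_pos h3]; push_cast; ring
        · rw [if_neg h3, if_neg h3]; push_cast; ring

theorem pvR_eq (seats : List Int) : ∀ (d j : Nat), seats.length - j = d → j < seats.length →
    pvR seats j = (match pvNext seats j with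
      | some m => (m : Int) - j
      | none => (seats.length : Int) + ((seats.length : Int) - 1 - j)) := by
  intro d
  induction d with
  | zero => intro j hd hj; omega
  | succ d ih =>
    intro j hd hj
    by_cases h1 : seats[j]?.getD 0 = 1
    · have hnextj : pvNext seats j = some j := by rw [pvNext, dif_pos hj, if_pos h1]
      rw [pvR, hnextj]
      split <;> simp
    · have hnextj : pvNext seats j = pvNext seats (j+1) := by rw [pvNext, dif_pos hj, if_neg h1]
      by_cases h2 : j + 1 < seats.length
      · rw [pvR, dif_pos h2, if_neg h1, hnextj, ih (j+1) (by omega) h2]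
        cases hn : pvNext seats (j+1) with
        | some m => simp; ring
        | none => simp; ring
      · have hnone : pvNext seats j = none := by
          rw [hnextj, pvNext, dif_neg h2]
        rw [pvR, dif_neg h2, if_neg h1, hnone]
        simp
        omega

theorem pvNext_bounds (seats : List Int) : ∀ (d j : Nat), seats.length - j = d →
    ∀ m, pvNext seats j = some m → j ≤ m ∧ m < seats.length ∧ seats[m]?.getD 0 = 1 := by
  intro d
  induction d with
  | zero =>
    intro j hd m hm
    rw [pvNext, dif_neg (by omega)] at hm
    cases hm
  | succ d ih =>
    intro j hd m hm
    have hj : j < seats.length := by omega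
    rw [pvNext, dif_pos hj] at hm
    by_cases h1 : seats[j]?.getD 0 = 1
    · rw [if_pos h1] at hm
      cases hm
      exact ⟨le_refl _, hj, h1⟩
    · rw [if_neg h1] at hm
      have := ih (j+1) (by omega) m hm
      exact ⟨by omega, this.2.1, this.2.2⟩

-- the list of person positions, as port B builds it (generalized start)
def pvOnes (xs : List Int) (s : Int) : List Int :=
  ((PySem.List.enumerate xs s).filter (fun p => p.2 == 1)).map (fun p => p.1)

theorem pvOnes_append (xs ys : List Int) (s : Int) :
    pvOnes (xs ++ ys) s = pvOnes xs s ++ pvOnes ys (s + xs.length) := by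
  simp [pvOnes, PySem.List.enumerate_append, List.filter_append]

theorem pvOnes_length (xs : List Int) (s : Int) : (pvOnes xs s).length = pvCnt xs := by
  induction xs generalizing s with
  | nil => simp [pvOnes, pvCnt]
  | cons x t ih =>
    simp only [pvOnes, pvCnt, PySem.List.enumerate_cons, List.filter_cons, List.countP_cons]
    by_cases h : x == 1 <;> simp_all [pvOnes, pvCnt]

theorem pvOnes_mem_bounds (xs : List Int) (s v : Int) (hv : v ∈ pvOnes xs s) :
    s ≤ v ∧ v < s + xs.length := by
  simp only [pvOnes, List.mem_map] at hv
  obtain ⟨p, hp, hpv⟩ := hv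
  have hpm := List.mem_of_mem_filter hp
  obtain ⟨k, hk, hpk⟩ := (PySem.List.mem_enumerate_iff xs s p).mp hpm
  rw [← hpv, hpk]
  constructor <;> [omega; (push_cast; omega)]

theorem pvOnes_lookup (seats : List Int) : ∀ (d j : Nat), seats.length - j = d →
    (pvOnes seats 0)[pvCnt (seats.take j)]? = (pvNext seats j).map (fun m => (m : Int)) := by
  intro d
  induction d with
  | zero =>
    intro j hd
    have hj : seats.length ≤ j := by omega
    have h1 : seats.take j = seats := List.take_of_length_le hj
    have h2 : pvNext seats j = none := by rw [pvNext, dif_neg (by omega)]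
    rw [h1, h2]
    have := pvOnes_length seats 0
    simp [this]
  | succ d ih =>
    intro j hd
    have hj : j < seats.length := by omega
    have hlen : (seats.take j).length = j := by rw [List.length_take]; omega
    have hcnt0 : (pvOnes (seats.take j) 0).length = pvCnt (seats.take j) := pvOnes_length _ _
    have hsp := pvOnes_append (seats.take j) (seats.drop j) 0
    rw [List.take_append_drop] at hsp
    have hdrop : seats.drop j = seats[j] :: seats.drop (j+1) := List.drop_eq_getElem_cons hj
    by_cases h1 : seats[j]?.getD 0 = 1
    · have hgj : seats[j] = 1 := by rw [List.getElem?_eq_getElem hj] at h1; simpa using h1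
      have hnext : pvNext seats j = some j := by rw [pvNext, dif_pos hj, if_pos h1]
      rw [hnext, hsp, hdrop]
      rw [List.getElem?_append_right (by rw [hcnt0])]
      rw [hcnt0, hlen]
      simp only [pvOnes, PySem.List.enumerate_cons, List.filter_cons, hgj]
      norm_num
    · have hgj : seats[j] ≠ 1 := by rw [List.getElem?_eq_getElem hj] at h1; simpa using h1
      have hnext : pvNext seats j = pvNext seats (j+1) := by rw [pvNext, dif_pos hj, if_neg h1]
      have hcnt : pvCnt (seats.take (j+1)) = pvCnt (seats.take j) := by
        have ht : seats.take (j+1) = seats.take j ++ [seats[j]] := by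
          rw [List.take_add_one, List.getElem?_eq_getElem hj]; rfl
        unfold pvCnt
        rw [ht, List.countP_append]
        simp [hgj]
      rw [hnext, ← hcnt]
      exact ih (j+1) (by omega)

-- pvPrev against the ones list: -1 while no 1 has been seen, else the last listed position
theorem pvPrev_lookup (seats : List Int) : ∀ j : Nat,
    (pvCnt (seats.take j) = 0 → pvPrev seats j = -1) ∧
    (0 < pvCnt (seats.take j) →
      (pvOnes seats 0)[pvCnt (seats.take j) - 1]? = some (pvPrev seats j)) := by
  intro j
  induction j with
  | zero => exact ⟨fun _ => rfl, fun h => absurd h (by simp [pvCnt])⟩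
  | succ j ih =>
    by_cases hj : j < seats.length
    · have htake : seats.take (j+1) = seats.take j ++ [seats[j]] := by
        rw [List.take_add_one, List.getElem?_eq_getElem hj]; rfl
      by_cases h1 : seats[j]?.getD 0 = 1
      · have hgj : seats[j] = 1 := by rw [List.getElem?_eq_getElem hj] at h1; simpa using h1
        have hc : pvCnt (seats.take (j+1)) = pvCnt (seats.take j) + 1 := by
          unfold pvCnt; rw [htake, List.countP_append]; simp [hgj]
        have hp : pvPrev seats (j+1) = (j : Int) := by
          rw [show pvPrev seats (j+1) = if seats[j]?.getD 0 = 1 then (j:Int) else pvPrev seats j from rfl,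
            if_pos h1]
        have hnext : pvNext seats j = some j := by rw [pvNext, dif_pos hj, if_pos h1]
        have hl := pvOnes_lookup seats (seats.length - j) j rfl
        rw [hnext] at hl
        refine ⟨fun h => by omega, fun _ => ?_⟩
        rw [hc, hp]
        simpa using hl
      · have hgj : seats[j] ≠ 1 := by rw [List.getElem?_eq_getElem hj] at h1; simpa using h1
        have hc : pvCnt (seats.take (j+1)) = pvCnt (seats.take j) := by
          unfold pvCnt; rw [htake, List.countP_append]; simp [hgj]
        have hp : pvPrev seats (j+1) = pvPrev seats j := by
          rw [show pvPrev seats (j+1) = if seats[j]?.getD 0 = 1 then (j:Int) else pvPrev seats j from rfl,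
            if_neg h1]
        rw [hc, hp]
        exact ih
    · have htake : seats.take (j+1) = seats.take j := by
        rw [List.take_of_length_le (by omega), List.take_of_length_le (by omega)]
      have h1 : ¬ seats[j]?.getD 0 = 1 := by
        rw [List.getElem?_eq_none (by omega)]; norm_num
      have hp : pvPrev seats (j+1) = pvPrev seats j := by
        rw [show pvPrev seats (j+1) = if seats[j]?.getD 0 = 1 then (j:Int) else pvPrev seats j from rfl,
          if_neg h1]
      rw [htake, hp]
      exact ih

-- B's while loop lands exactly at c when people[0..c] are all ≤ j and people[c+1] is not
theorem pvAdv_eq (people : List Int) (j : Int) (c : Nat)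
    (hclen : c + 1 < people.length)
    (hle : ∀ i : Nat, i ≤ c → people.getD i 0 ≤ j)
    (hgt : ¬ people.getD (c+1) 0 ≤ j) :
    ∀ (fuel : Nat) (k : Int), 0 ≤ k → k.toNat ≤ c → c - k.toNat = fuel →
      pvAdv people j k = (c : Int) := by
  intro fuel
  induction fuel with
  | zero =>
    intro k h0 hk hf
    have hkc : k = (c : Int) := by omega
    subst hkc
    rw [pvAdv, dif_neg]
    rintro ⟨-, hget⟩
    apply hgt
    rwa [show ((c:Int) + 1) = ((c+1 : Nat) : Int) by push_cast; ring,
      PySem.List.pyGetD_natCast] at hget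
  | succ fuel ih =>
    intro k h0 hk hf
    have hklt : k.toNat < c := by omega
    rw [pvAdv, dif_pos]
    · exact ih (k + 1) (by omega) (by omega) (by omega)
    · constructor
      · rw [PySem.List.len_eq]; omega
      · rw [show (k + 1 : Int) = ((k.toNat + 1 : Nat) : Int) by omega, PySem.List.pyGetD_natCast]
        exact hle (k.toNat + 1) (by omega)

def getD_set (l : List Int) (n i : Nat) (v : Int) (hn : n < l.length) :
    (l.set n v).getD i 0 = if i = n then v else l.getD i 0 := by
  simp only [List.getD_eq_getElem?_getD, List.getElem?_set]
  by_cases h : i = n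
  · subst h; simp [hn]
  · rw [if_neg (by omega : ¬ n = i), if_neg h]

-- A's forward loop fills `left` with pvL
theorem A_left (seats : List Int) : ∀ n : Nat, n ≤ seats.length →
    (let l := (PySem.List.pyRange 0 (n : Int) 1).foldl (fun l i =>
        if PySem.List.pyGetD seats i 0 = 1 then PySem.List.pySetD l i 0
        else if 0 < i then PySem.List.pySetD l i (PySem.List.pyGetD l (i - 1) 0 + 1)
        else l) (List.replicate seats.length (PySem.List.len seats));
      l.length = seats.length ∧ (∀ i : Nat, i < n → l.getD i 0 = pvL seats i) ∧
        (∀ i : Nat, n ≤ i → i < seats.length → l.getD i 0 = (seats.length : Int))) := by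
  intro n
  induction n with
  | zero =>
    intro _
    simp only [Nat.cast_zero, PySem.List.pyRange_one_eq_nil (by omega : (0:Int) ≤ 0), List.foldl_nil]
    refine ⟨by simp, by omega, ?_⟩
    intro i _ hi
    simp [List.getD_eq_getElem?_getD, hi, PySem.List.len]
  | succ n ih =>
    intro hn
    obtain ⟨hlen, hin, hout⟩ := ih (by omega)
    have hnlt : n < seats.length := by omega
    have hsplit : PySem.List.pyRange 0 ((n:Int)+1) 1 = PySem.List.pyRange 0 (n:Int) 1 ++ [(n:Int)] := by
      simpa using PySem.List.pyRange_one_succ_right (a := 0) (b := (n:Int)) (by positivity)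
    simp only [Nat.cast_add, Nat.cast_one, hsplit, List.foldl_append, List.foldl_cons, List.foldl_nil]
    set l := (PySem.List.pyRange 0 (n:Int) 1).foldl (fun l i =>
        if PySem.List.pyGetD seats i 0 = 1 then PySem.List.pySetD l i 0
        else if 0 < i then PySem.List.pySetD l i (PySem.List.pyGetD l (i - 1) 0 + 1)
        else l) (List.replicate seats.length (PySem.List.len seats)) with hl
    have hget_seats : PySem.List.pyGetD seats ((n:Int)) 0 = seats[n]?.getD 0 := by simp
    by_cases h1 : seats[n]?.getD 0 = 1
    · rw [if_pos (by rw [hget_seats]; exact h1),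
        show PySem.List.pySetD l (n:Int) 0 = l.set n 0 from by simp]
      refine ⟨by simp [hlen], ?_, ?_⟩
      · intro i hi
        rw [getD_set l n i 0 (by omega)]
        by_cases h : i = n
        · rw [if_pos h, h]
          cases n with
          | zero => rw [pvL, if_pos h1]
          | succ m => rw [pvL, if_pos h1]
        · rw [if_neg h]; exact hin i (by omega)
      · intro i h2i hi2
        rw [getD_set l n i 0 (by omega), if_neg (by omega)]
        exact hout i (by omega) hi2
    · rw [if_neg (by rw [hget_seats]; exact h1)]
      by_cases h0 : (0:Int) < (n:Int)
      · have hnpos : 0 < n := by exact_mod_cast h0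
        rw [if_pos h0]
        have harg : PySem.List.pyGetD l ((n:Int) - 1) 0 = l.getD (n-1) 0 := by
          rw [show ((n:Int) - 1) = ((n-1 : Nat) : Int) by omega, PySem.List.pyGetD_natCast]
        rw [harg, hin (n-1) (by omega),
          show PySem.List.pySetD l (n:Int) (pvL seats (n-1) + 1) = l.set n (pvL seats (n-1) + 1) from by simp]
        refine ⟨by simp [hlen], ?_, ?_⟩
        · intro i hi
          rw [getD_set l n i _ (by omega)]
          by_cases h : i = n
          · rw [if_pos h, h]
            have hidx : n - 1 + 1 = n := by omega
            conv_rhs => rw [show n = n - 1 + 1 by omega]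
            rw [pvL, hidx, if_neg h1]
          · rw [if_neg h]; exact hin i (by omega)
        · intro i h2i hi2
          rw [getD_set l n i _ (by omega), if_neg (by omega)]
          exact hout i (by omega) hi2
      · have hn0 : n = 0 := by omega
        rw [if_neg h0]
        refine ⟨hlen, ?_, ?_⟩
        · intro i hi
          have h0' : i = 0 := by omega
          subst h0'
          subst hn0
          rw [hout 0 (by omega) (by omega), pvL, if_neg h1]
        · intro i hi hi2
          exact hout i (by omega) hi2

-- A's backward loop fills `right` with pvR
theorem A_right (seats : List Int) : ∀ t : Nat, t ≤ seats.length → ∀ r : List Int,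
    r.length = seats.length →
    (∀ i : Nat, i < seats.length → t ≤ i → r.getD i 0 = pvR seats i) →
    (∀ i : Nat, i < t → r.getD i 0 = (seats.length : Int)) →
    (∀ i : Nat, i < seats.length →
      ((PySem.List.pyRange ((t:Int) - 1) (-1) (-1)).foldl (fun r i =>
        if PySem.List.pyGetD seats i 0 = 1 then PySem.List.pySetD r i 0
        else if i < (PySem.List.len seats) - 1 then
          PySem.List.pySetD r i (PySem.List.pyGetD r (i + 1) 0 + 1)
        else r) r).getD i 0 = pvR seats i) := by
  intro t
  induction t with
  | zero =>
    intro _ r _ hr _ i hi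
    rw [show ((0:Nat):Int) - 1 = -1 by norm_num, PySem.List.pyRange_neg_one_eq_nil (by omega)]
    exact hr i hi (by omega)
  | succ t ih =>
    intro ht r hrlen hr hrN
    have htlt : t < seats.length := by omega
    have hcons : PySem.List.pyRange (((t+1:Nat):Int) - 1) (-1) (-1)
        = (t:Int) :: PySem.List.pyRange ((t:Int) - 1) (-1) (-1) := by
      rw [show (((t+1:Nat):Int) - 1) = (t:Int) by push_cast; ring]
      exact PySem.List.pyRange_neg_one_cons (by omega)
    rw [hcons]
    simp only [List.foldl_cons]
    have hget_seats : PySem.List.pyGetD seats ((t:Int)) 0 = seats[t]?.getD 0 := by simp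
    have hlenN : PySem.List.len seats = (seats.length : Int) := by simp
    by_cases h1 : seats[t]?.getD 0 = 1
    · rw [if_pos (by rw [hget_seats]; exact h1),
        show PySem.List.pySetD r (t:Int) 0 = r.set t 0 from by simp]
      apply ih (by omega) _ (by simp [hrlen])
      · intro i hi hti
        rw [getD_set r t i 0 (by omega)]
        by_cases h : i = t
        · rw [if_pos h, h, pvR]; split <;> rfl
        · rw [if_neg h]; exact hr i hi (by omega)
      · intro i hi
        rw [getD_set r t i 0 (by omega), if_neg (by omega)]
        exact hrN i (by omega)
    · rw [if_neg (by rw [hget_seats]; exact h1)]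
      by_cases h2 : (t:Int) < (PySem.List.len seats) - 1
      · have ht1 : t + 1 < seats.length := by rw [hlenN] at h2; omega
        rw [if_pos h2]
        have harg : PySem.List.pyGetD r ((t:Int) + 1) 0 = r.getD (t+1) 0 := by
          rw [show ((t:Int) + 1) = ((t+1 : Nat) : Int) by push_cast; ring, PySem.List.pyGetD_natCast]
        rw [harg, hr (t+1) ht1 (by omega),
          show PySem.List.pySetD r (t:Int) (pvR seats (t+1) + 1) = r.set t (pvR seats (t+1) + 1) from by simp]
        apply ih (by omega) _ (by simp [hrlen])
        · intro i hi hti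
          rw [getD_set r t i _ (by omega)]
          by_cases h : i = t
          · rw [if_pos h, h]
            conv_rhs => rw [pvR]
            rw [dif_pos ht1, if_neg h1]
          · rw [if_neg h]; exact hr i hi (by omega)
        · intro i hi
          rw [getD_set r t i _ (by omega), if_neg (by omega)]
          exact hrN i (by omega)
      · rw [if_neg h2]
        have ht1 : ¬ (t + 1 < seats.length) := by rw [hlenN] at h2; omega
        apply ih (by omega) _ hrlen
        · intro i hi hti
          by_cases h : i = t
          · rw [h, hrN t (by omega), pvR, dif_neg ht1, if_neg h1]
          · exact hr i hi (by omega)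
        · intro i hi
          exact hrN i (by omega)

-- B's single pass produces exactly the per-empty-seat minima of A's two arrays
theorem B_fold (seats : List Int) :
    ∀ (xs : List Int) (j : Nat) (k : Int) (dists : List Int),
    seats.drop j = xs → 0 ≤ k → k.toNat ≤ pvCnt (seats.take j) →
    (((PySem.List.enumerate xs (j : Int)).foldl (fun (st : Int × List Int) p =>
      if p.2 == 0 then
        (pvAdv ([-(seats.length : Int)] ++ pvOnes seats 0 ++ [2 * (seats.length : Int) - 1]) p.1 st.1,
          st.2 ++ [min
            (p.1 - PySem.List.pyGetD
              ([-(seats.length : Int)] ++ pvOnes seats 0 ++ [2 * (seats.length : Int) - 1])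
              (pvAdv ([-(seats.length : Int)] ++ pvOnes seats 0 ++ [2 * (seats.length : Int) - 1]) p.1 st.1) 0)
            (PySem.List.pyGetD
              ([-(seats.length : Int)] ++ pvOnes seats 0 ++ [2 * (seats.length : Int) - 1])
              (pvAdv ([-(seats.length : Int)] ++ pvOnes seats 0 ++ [2 * (seats.length : Int) - 1]) p.1 st.1 + 1) 0 - p.1)])
      else st) (k, dists)).2
    = dists ++ ((PySem.List.enumerate xs (j : Int)).filter (fun p => p.2 == 0)).map
        (fun p => min (pvL seats p.1.toNat) (pvR seats p.1.toNat))) := by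
  intro xs
  induction xs with
  | nil => intro j k dists _ _ _; simp
  | cons x rest ih =>
    intro j k dists hdrop h0 hk
    set P : List Int :=
      [-(seats.length : Int)] ++ pvOnes seats 0 ++ [2 * (seats.length : Int) - 1] with hPdef
    have hPcons : P = -(seats.length : Int) :: (pvOnes seats 0 ++ [2 * (seats.length : Int) - 1]) := by
      rw [hPdef]; simp
    have hones_len : (pvOnes seats 0).length = pvCnt seats := pvOnes_length _ _
    have hPlen : P.length = pvCnt seats + 2 := by rw [hPcons]; simp [hones_len]
    have hj : j < seats.length := by
      by_contra h
      rw [List.drop_eq_nil_of_le (by omega)] at hdrop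
      exact List.cons_ne_nil x rest hdrop.symm
    have hcons := List.drop_eq_getElem_cons hj
    rw [hdrop] at hcons
    obtain ⟨hxj, hrest⟩ := List.cons_eq_cons.mp hcons
    have hxj : seats[j] = x := hxj.symm
    have hrest : seats.drop (j+1) = rest := hrest.symm
    have hgetD : seats[j]?.getD 0 = x := by
      rw [List.getElem?_eq_getElem hj, hxj]; rfl
    have hcast : ((j:Int) + 1) = ((j+1 : Nat) : Int) := by push_cast; ring
    have htake : seats.take (j+1) = seats.take j ++ [x] := by
      rw [List.take_add_one, List.getElem?_eq_getElem hj, hxj]; rfl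
    have hcnt_le : pvCnt (seats.take j) ≤ pvCnt (seats.take (j+1)) := by
      unfold pvCnt; rw [htake, List.countP_append]; omega
    rw [PySem.List.enumerate_cons]
    simp only [List.foldl_cons, List.filter_cons]
    by_cases h0' : x = 0
    · subst h0'
      -- j is an empty seat
      set c := pvCnt (seats.take j) with hc
      have hc_le : c ≤ pvCnt seats := by
        have hsplitc : pvCnt seats = pvCnt (seats.take j) + pvCnt (seats.drop j) := by
          unfold pvCnt
          conv_lhs => rw [← List.take_append_drop j seats]
          rw [List.countP_append]
        omega
      have hsp := pvOnes_append (seats.take j) (seats.drop j) 0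
      rw [List.take_append_drop] at hsp
      have hlen1 : (pvOnes (seats.take j) 0).length = c := pvOnes_length _ _
      have hlentake : (seats.take j).length = j := by rw [List.length_take]; omega
      have hne1 : seats[j]?.getD 0 ≠ 1 := by rw [hgetD]; norm_num
      have hlookup := pvOnes_lookup seats (seats.length - j) j rfl
      have hprev := pvPrev_lookup seats j
      rw [← hc] at hlookup
      simp only [← hc] at hprev
      have hclen : c + 1 < P.length := by omega
      have hle : ∀ i : Nat, i ≤ c → P.getD i 0 ≤ (j : Int) := by
        intro i hi
        cases i with
        | zero =>
          rw [hPcons]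
          simp only [List.getD_cons_zero]
          omega
        | succ h =>
          rw [hPcons, List.getD_cons_succ]
          have hhlt : h < (pvOnes seats 0).length := by omega
          rw [List.getD_eq_getElem?_getD, List.getElem?_append_left hhlt,
            ← List.getD_eq_getElem?_getD]
          have hhlt1 : h < (pvOnes (seats.take j) 0).length := by omega
          rw [List.getD_eq_getElem?_getD, hsp, List.getElem?_append_left hhlt1,
            ← List.getD_eq_getElem?_getD]
          have hmem : (pvOnes (seats.take j) 0).getD h 0 ∈ pvOnes (seats.take j) 0 := by
            rw [List.getD_eq_getElem?_getD, List.getElem?_eq_getElem hhlt1]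
            exact List.getElem_mem _
          have := pvOnes_mem_bounds (seats.take j) 0 _ hmem
          rw [hlentake] at this
          omega
      have hmid : P.getD (c+1) 0 = (pvOnes seats 0 ++ [2 * (seats.length : Int) - 1]).getD c 0 := by
        rw [hPcons, List.getD_cons_succ]
      have hfloor : P.getD c 0 = (if c = 0 then -(seats.length : Int) else pvPrev seats j) := by
        by_cases hc0 : c = 0
        · rw [if_pos hc0, hc0, hPcons]
          simp
        · rw [if_neg hc0]
          have hpv := hprev.2 (by omega)
          rw [hPcons, show c = (c - 1) + 1 by omega, List.getD_cons_succ]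
          have hlt : c - 1 < (pvOnes seats 0).length := by omega
          rw [List.getD_eq_getElem?_getD, List.getElem?_append_left hlt]
          simp [hpv]
      have hL := pvL_eq seats j
      rw [if_neg hne1] at hL
      have hR := pvR_eq seats (seats.length - j) j rfl hj
      -- the appended value, as a function of where the while loop lands
      have hmain : pvAdv P (j:Int) k = (c : Int) ∧
          min ((j:Int) - PySem.List.pyGetD P ((c : Nat) : Int) 0)
            (PySem.List.pyGetD P (((c : Nat) : Int) + 1) 0 - (j:Int))
          = min (pvL seats j) (pvR seats j) := by
        have hgetc : PySem.List.pyGetD P ((c : Nat) : Int) 0 = P.getD c 0 :=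
          PySem.List.pyGetD_natCast _ _ _
        have hgetc1 : PySem.List.pyGetD P (((c : Nat) : Int) + 1) 0 = P.getD (c+1) 0 := by
          rw [show (((c : Nat) : Int) + 1) = ((c + 1 : Nat) : Int) by push_cast; ring,
            PySem.List.pyGetD_natCast]
        cases hn : pvNext seats j with
        | some m =>
          rw [hn] at hlookup hR
          dsimp only at hR
          obtain ⟨hjm, hmlt, hm1⟩ := pvNext_bounds seats (seats.length - j) j rfl m hn
          have hmne : m ≠ j := by
            intro he
            rw [he, hgetD] at hm1
            norm_num at hm1
          have hclt : c < (pvOnes seats 0).length :=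
            (List.getElem?_eq_some_iff.mp (by simpa using hlookup)).1
          have hceil : P.getD (c+1) 0 = (m : Int) := by
            rw [hmid, List.getD_eq_getElem?_getD, List.getElem?_append_left hclt]
            simp [hlookup]
          have hgt : ¬ P.getD (c+1) 0 ≤ (j : Int) := by
            rw [hceil]; omega
          refine ⟨pvAdv_eq P (j:Int) c hclen hle hgt (c - k.toNat) k h0 hk rfl, ?_⟩
          rw [hgetc, hgetc1, hceil, hfloor, hR]
          by_cases hc0 : c = 0
          · have hpm1 : pvPrev seats j = -1 := hprev.1 (by omega)
            rw [if_pos hc0, hL, if_neg (by rw [hpm1]; norm_num),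
              show (j:Int) - -(seats.length:Int) = (seats.length:Int) + (j:Int) from by ring]
          · have hpv := hprev.2 (by omega)
            have hpge : 0 ≤ pvPrev seats j := by
              have hmem : pvPrev seats j ∈ pvOnes seats 0 := by
                obtain ⟨hl2, hg2⟩ := List.getElem?_eq_some_iff.mp hpv
                rw [← hg2]; exact List.getElem_mem _
              exact (pvOnes_mem_bounds seats 0 _ hmem).1
            rw [if_neg hc0, hL, if_pos hpge]
        | none =>
          rw [hn] at hlookup hR
          dsimp only at hR
          have hcge : (pvOnes seats 0).length ≤ c :=
            List.getElem?_eq_none_iff.mp (by simpa using hlookup)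
          have hceq : c = (pvOnes seats 0).length := by omega
          have hceil : P.getD (c+1) 0 = 2 * (seats.length : Int) - 1 := by
            rw [hmid, List.getD_eq_getElem?_getD, List.getElem?_append_right (by omega), hceq]
            simp
          have hgt : ¬ P.getD (c+1) 0 ≤ (j : Int) := by
            rw [hceil]; omega
          refine ⟨pvAdv_eq P (j:Int) c hclen hle hgt (c - k.toNat) k h0 hk rfl, ?_⟩
          rw [hgetc, hgetc1, hceil, hfloor, hR]
          by_cases hc0 : c = 0
          · have hpm1 : pvPrev seats j = -1 := hprev.1 (by omega)
            rw [if_pos hc0, hL, if_neg (by rw [hpm1]; norm_num),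
              show (j:Int) - -(seats.length:Int) = (seats.length:Int) + (j:Int) from by ring,
              show 2 * (seats.length:Int) - 1 - (j:Int)
                = (seats.length:Int) + ((seats.length:Int) - 1 - (j:Int)) from by ring]
          · have hpv := hprev.2 (by omega)
            have hpge : 0 ≤ pvPrev seats j := by
              have hmem : pvPrev seats j ∈ pvOnes seats 0 := by
                obtain ⟨hl2, hg2⟩ := List.getElem?_eq_some_iff.mp hpv
                rw [← hg2]; exact List.getElem_mem _
              exact (pvOnes_mem_bounds seats 0 _ hmem).1
            rw [if_neg hc0, hL, if_pos hpge,
              show 2 * (seats.length:Int) - 1 - (j:Int)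
                = (seats.length:Int) + ((seats.length:Int) - 1 - (j:Int)) from by ring]
      obtain ⟨hadv, hval⟩ := hmain
      rw [if_pos (show ((0:Int) == 0) = true from rfl),
        if_pos (show ((0:Int) == 0) = true from rfl)]
      rw [hadv, hval, hcast]
      rw [ih (j+1) (c:Int) (dists ++ [min (pvL seats j) (pvR seats j)]) hrest (by positivity)
        (by rw [Int.toNat_natCast]; omega)]
      rw [List.append_assoc, List.map_cons,
        show ((j:Int)).toNat = j from Int.toNat_natCast j]
      rfl
    · -- seat is not empty: state unchanged
      have hb0 : (x == 0) = false := by simp [h0']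
      simp only [hb0, Bool.false_eq_true, if_false]
      rw [hcast]
      exact ih (j+1) k dists hrest h0 (by omega)

-- ===== VERDICT (by name: the statement is the Claim_ definition above) =====
theorem maxDistToClosest1_spec : Claim_equal_maxDistToClosest1 := by
  intro seats _ _
  unfold Spec_maxDistToClosest1 maxDistToClosest1 maxDistToClosest1_alt
  dsimp only
  rw [show ((PySem.List.enumerate seats 0).filter (fun p => p.2 == 1)).map (fun p => p.1)
      = pvOnes seats 0 from rfl]
  obtain ⟨hLlen, hLin, -⟩ := A_left seats seats.length (le_refl _)
  have hR := A_right seats seats.length (le_refl _)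
    (List.replicate seats.length (PySem.List.len seats)) (by simp)
    (fun i hi hi2 => absurd hi2 (by omega))
    (by intro i hi; simp [List.getD_eq_getElem?_getD, hi])
  have hB := B_fold seats seats 0 0 [] (by simp) (le_refl _) (by simp)
  simp only [Nat.cast_zero, List.nil_append] at hB
  simp only [PySem.List.len_eq] at hLin hR hB ⊢
  rw [hB]
  apply congrArg (fun l => (PySem.List.max? l (fun x => x)).getD 0)
  apply List.map_congr_left
  intro p hp
  have hpmem : p ∈ PySem.List.enumerate seats 0 := List.mem_of_mem_filter hp
  obtain ⟨k, hk, hpk⟩ := (PySem.List.mem_enumerate_iff seats 0 p).mp hpmem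
  rw [hpk]
  dsimp only
  simp only [zero_add, Int.toNat_natCast]
  rw [PySem.List.pyGetD_natCast, PySem.List.pyGetD_natCast, hLin k hk, hR k hk]
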